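-- pv_equiv track=rewrite | github.com/joreynajr/CSE-280a | Project/scripts/Phase1_Sequence.py | introduce_specific_mutations
-- ===== SOURCE A (Python) =====
-- def introduce_specific_mutations(vntr, sites, mutations):
-- 	"""
-- 	Generate a VNTR sequence with the specified mutations at the specified sites.
--
-- 	Params
-- 	------
--
-- 	- vntr, the DNA copy sequence which is copied.
-- 	- sites, locus where the SNP mutation will be introduced.
-- 	- mutations, a list of mutations.
--
-- 	Returns
-- 	-------
-- 	A single copy of the VNTR sequence with mutations at the specified sites.
-- 	"""
--
-- 	if len(sites) != len(mutations):
-- 		raise Exception('The number of sites and mutations do not correspond.')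
-- 	m_vntr = list(vntr)
-- 	for site, nucleotide in enumerate(m_vntr):
-- 		if site in sites:
-- 			mut_idx = sites.index(site)
-- 			if nucleotide == mutations[mut_idx]:
-- 				raise Exception('Not a mutation. The current site is {}. The current '.format(site) + \
-- 					'nucleotide is {}. Please use a different nucleotide '.format(nucleotide) + \
-- 					'for this site.')
-- 			else:
-- 				m_vntr[site] =  mutations[mut_idx]
-- 	return ''.join(m_vntr)
-- ===== SOURCE B (Python) =====
-- def introduce_specific_mutations(vntr, sites, mutations):
-- 	if len(sites) != len(mutations):
-- 		raise Exception('The number of sites and mutations do not correspond.')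
-- 	# Apply each requested mutation directly (first listing of a site wins),
-- 	# instead of scanning every sequence position and searching the site list.
-- 	out = list(vntr)
-- 	seen = set()
-- 	for site, mut in zip(sites, mutations):
-- 		if site in seen:
-- 			continue
-- 		seen.add(site)
-- 		if 0 <= site < len(vntr):
-- 			if vntr[site] == mut:
-- 				raise Exception('Not a mutation. The current site is {}. The current '.format(site) + \
-- 					'nucleotide is {}. Please use a different nucleotide '.format(vntr[site]) + \
-- 					'for this site.')
-- 			out[site] = mut
-- 	return ''.join(out)
-- ===== Notes on version B (the rewrite author's own statement) =====
-- stated objective: faster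
-- what changed: Instead of scanning every sequence position and searching the site list with 'in'/'.index', B copies the sequence once and iterates only over the (site, mutation) pairs, deduplicating sites with a seen-set (first listing wins, like sites.index) and assigning in place at in-range sites.
import Mathlib
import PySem

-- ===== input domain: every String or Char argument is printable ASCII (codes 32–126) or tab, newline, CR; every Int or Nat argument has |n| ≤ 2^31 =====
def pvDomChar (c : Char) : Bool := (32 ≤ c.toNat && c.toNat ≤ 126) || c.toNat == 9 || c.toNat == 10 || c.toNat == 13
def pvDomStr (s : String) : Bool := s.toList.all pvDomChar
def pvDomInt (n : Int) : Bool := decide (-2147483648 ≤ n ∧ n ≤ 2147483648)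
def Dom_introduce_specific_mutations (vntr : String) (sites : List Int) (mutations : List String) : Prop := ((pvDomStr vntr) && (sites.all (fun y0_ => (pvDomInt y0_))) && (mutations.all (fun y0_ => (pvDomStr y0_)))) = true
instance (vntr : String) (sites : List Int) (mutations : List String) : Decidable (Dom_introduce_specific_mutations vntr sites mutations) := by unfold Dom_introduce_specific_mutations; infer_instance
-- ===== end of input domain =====

-- B iterates only over the (site, mutation) pairs, deduplicating sites with a seen-set and
-- assigning into a copy of the sequence, instead of A's scan of every position with
-- membership/.index searches of the site list (objective: faster).

-- ===== PORT A =====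
-- Loop body of A's `for site, nucleotide in enumerate(m_vntr)` as a named helper.
-- `enumerate(m_vntr)` yields each entry before the step that may overwrite it (entry i is
-- only assigned at step i, after being read), so enumerating the initial list while the
-- mutable list is the fold accumulator is exact. `p.1.toNat` is exact: enumerate indices ≥ 0.
def pvStepA (sites : List Int) (mutations : List String) (m_vntr : List String) (p : Int × String) : List String :=
  if sites.contains p.1 then
    match PySem.List.index? sites p.1 with      -- sites.index(site); contains holds here
    | none => m_vntr                            -- unreachable: contains holds
    | some mut_idx =>
      match PySem.List.pyGet? mutations (mut_idx : Int) with  -- mutations[mut_idx]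
      | none => m_vntr                          -- unreachable once the length check passed
      | some mu =>
        if p.2 == mu then m_vntr                -- Python: raise Exception (excluded by Pre_)
        else m_vntr.set p.1.toNat mu            -- m_vntr[site] = mutations[mut_idx]
  else m_vntr

def introduce_specific_mutations (vntr : String) (sites : List Int) (mutations : List String) : String :=
  if sites.length ≠ mutations.length then ""    -- Python: raise Exception (excluded by Pre_)
  else
    String.join ((PySem.List.enumerate (vntr.toList.map (fun c => String.ofList [c]))).foldl
      (pvStepA sites mutations) (vntr.toList.map (fun c => String.ofList [c])))

-- ===== PORT B =====
-- Loop body of B's `for site, mut in zip(sites, mutations)` as a named helper; the state is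
-- (seen, out). `p.1.toNat` is exact: the assigning branch requires 0 ≤ p.1.
def pvStepB (cs : List Char) (st : PySem.Set Int × List String) (p : Int × String) : PySem.Set Int × List String :=
  if PySem.Set.contains st.1 p.1 then st        -- if site in seen: continue
  else
    if 0 ≤ p.1 ∧ p.1 < (cs.length : Int) then
      match PySem.List.pyGet? cs p.1 with       -- vntr[site]; in range here
      | none => (PySem.Set.add st.1 p.1, st.2)  -- unreachable: index in range
      | some c =>
        if String.ofList [c] == p.2 then (PySem.Set.add st.1 p.1, st.2)  -- Python: raise (excluded by Pre_)
        else (PySem.Set.add st.1 p.1, st.2.set p.1.toNat p.2)            -- out[site] = mut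
    else (PySem.Set.add st.1 p.1, st.2)

def introduce_specific_mutations_alt (vntr : String) (sites : List Int) (mutations : List String) : String :=
  if sites.length ≠ mutations.length then ""    -- Python: raise Exception (excluded by Pre_)
  else
    String.join (((sites.zip mutations).foldl (pvStepB vntr.toList)
      ((PySem.Set.empty : PySem.Set Int), vntr.toList.map (fun c => String.ofList [c]))).2)

-- ===== PRECONDITION & SPEC =====
-- first mutation listed for site i (first match, as Python's sites.index finds it)
def pvFirstMut (sites : List Int) (mutations : List String) (i : Int) : Option String :=
  (PySem.List.index? sites i).bind (fun mi => mutations[mi]?)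

-- Pre_ excludes exactly the inputs on which A raises: a site/mutation length mismatch, or an
-- in-range site whose (first) listed mutation equals the nucleotide already there.
def Pre_introduce_specific_mutations (vntr : String) (sites : List Int) (mutations : List String) : Prop :=
  sites.length = mutations.length ∧
  ∀ p ∈ PySem.List.enumerate vntr.toList, pvFirstMut sites mutations p.1 ≠ some (String.ofList [p.2])
instance (vntr : String) (sites : List Int) (mutations : List String) : Decidable (Pre_introduce_specific_mutations vntr sites mutations) := by unfold Pre_introduce_specific_mutations; infer_instance

def pvWitness_introduce_specific_mutations : String × List Int × List String :=
  ("ACGT", [1, 3], ["G", "A"])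

def Spec_introduce_specific_mutations (vntr : String) (sites : List Int) (mutations : List String) (out : String) : Prop := out = introduce_specific_mutations_alt vntr sites mutations
instance (vntr : String) (sites : List Int) (mutations : List String) (out : String) : Decidable (Spec_introduce_specific_mutations vntr sites mutations out) := by unfold Spec_introduce_specific_mutations; infer_instance

-- ===== CLAIM (what is proved, stated in full; the proofs are below) =====
def Claim_equal_introduce_specific_mutations : Prop := ∀ (vntr : String) (sites : List Int) (mutations : List String), Dom_introduce_specific_mutations vntr sites mutations → Pre_introduce_specific_mutations vntr sites mutations → Spec_introduce_specific_mutations vntr sites mutations (introduce_specific_mutations vntr sites mutations)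

-- ===== LEMMAS AND PROOFS =====

-- value A leaves at an enumerated entry (the raise branches keep the original entry)
def pvGA (sites : List Int) (mutations : List String) (p : Int × String) : String :=
  match pvFirstMut sites mutations p.1 with
  | none => p.2
  | some m => if m = p.2 then p.2 else m

lemma pv_lookup_zip (x : Int) :
    ∀ (sites : List Int) (mutations : List String),
      sites.length = mutations.length →
      List.lookup x (sites.zip mutations) = pvFirstMut sites mutations x := by
  intro sites
  induction sites with
  | nil =>
    intro mutations _
    simp [pvFirstMut]
  | cons s ss ih =>
    intro mutations hlen
    cases mutations with
    | nil => simp at hlen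
    | cons m ms =>
      simp only [List.length_cons, Nat.add_right_cancel_iff] at hlen
      rw [List.zip_cons_cons, List.lookup_cons]
      by_cases hx : x = s
      · subst hx
        unfold pvFirstMut
        rw [PySem.List.index?_cons_self]
        simp
      · have hb : (x == s) = false := by simp [hx]
        rw [ih ms hlen]
        unfold pvFirstMut
        rw [PySem.List.index?_cons_of_ne ss (fun h => hx h.symm)]
        cases hi : PySem.List.index? ss x with
        | none => simp [hb]
        | some mi => simp [hb]

lemma pv_stepA_eq (sites : List Int) (mutations : List String) (pre l : List String) (x : String) :
    pvStepA sites mutations (pre ++ x :: l) ((pre.length : Int), x)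
      = (pre ++ [pvGA sites mutations ((pre.length : Int), x)]) ++ l := by
  cases hidx : PySem.List.index? sites ((pre.length : Int)) with
  | none =>
    have hmem : ((pre.length : Int)) ∉ sites := (PySem.List.index?_eq_none_iff _ _).mp hidx
    have hidx' : List.idxOf? ((pre.length : Int)) sites = none := by
      rw [← PySem.List.index?_eq_idxOf?]; exact hidx
    simp [pvStepA, pvGA, pvFirstMut, hidx', hmem]
  | some mi =>
    have hmem : ((pre.length : Int)) ∈ sites :=
      (PySem.List.index?_isSome_iff _ _).mp (by rw [hidx]; rfl)
    have hidx' : List.idxOf? ((pre.length : Int)) sites = some mi := by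
      rw [← PySem.List.index?_eq_idxOf?]; exact hidx
    cases hget : mutations[mi]? with
    | none => simp [pvStepA, pvGA, pvFirstMut, hidx', hmem, hget]
    | some mu =>
      by_cases he : x = mu
      · subst he
        simp [pvStepA, pvGA, pvFirstMut, hidx', hmem, hget]
      · have hne : ¬ mu = x := fun h => he h.symm
        simp [pvStepA, pvGA, pvFirstMut, hidx', hmem, hget, he, hne]

lemma pv_A_loop (sites : List Int) (mutations : List String) :
    ∀ (l pre : List String),
      (PySem.List.enumerate l (pre.length : Int)).foldl (pvStepA sites mutations) (pre ++ l)
        = pre ++ (PySem.List.enumerate l (pre.length : Int)).map (pvGA sites mutations) := by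
  intro l
  induction l with
  | nil => intro pre; simp
  | cons x l ih =>
    intro pre
    rw [PySem.List.enumerate_cons]
    simp only [List.foldl_cons, List.map_cons]
    rw [pv_stepA_eq]
    have h1 : (pre.length : Int) + 1
        = (((pre ++ [pvGA sites mutations ((pre.length : Int), x)]).length : Int)) := by simp
    rw [h1, ih]
    simp

-- the second component of one B step keeps its length
lemma pv_stepB_len (cs : List Char) (st : PySem.Set Int × List String) (p : Int × String) :
    ((pvStepB cs st p).2).length = st.2.length := by
  unfold pvStepB
  split_ifs with h1 h2
  · rfl
  · cases PySem.List.pyGet? cs p.1 with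
    | none => rfl
    | some c =>
      by_cases he : String.ofList [c] == p.2
      · simp [he]
      · simp [he, List.length_set]
  · rfl

-- B's loop keeps the length of `out`
lemma pv_B_loop_len (cs : List Char) :
    ∀ (zs : List (Int × String)) (st : PySem.Set Int × List String),
      ((zs.foldl (pvStepB cs) st).2).length = st.2.length := by
  intro zs
  induction zs with
  | nil => intro st; rfl
  | cons p t ih =>
    intro st
    rw [List.foldl_cons, ih, pv_stepB_len]

-- what B's loop leaves at each index: the first mutation listed for an unseen in-range site,
-- the original entry otherwise (the raise branch is ruled out by the lookup hypothesis)
lemma pv_B_loop (cs : List Char) :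
    ∀ (zs : List (Int × String)) (seen : PySem.Set Int) (out : List String),
      out.length = cs.length →
      (∀ (j : Nat) (hj : j < cs.length), (j : Int) ∉ seen →
        List.lookup (j : Int) zs ≠ some (String.ofList [cs[j]])) →
      ∀ (j : Nat), j < cs.length →
        ((zs.foldl (pvStepB cs) (seen, out)).2)[j]? =
          (if (j : Int) ∈ seen then none else List.lookup (j : Int) zs).elim out[j]? some := by
  intro zs
  induction zs with
  | nil =>
    intro seen out _ _ j hj
    by_cases hm : (j : Int) ∈ seen <;> simp [hm]
  | cons p t ih =>
    obtain ⟨s, m⟩ := p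
    intro seen out hlen h j hj
    rw [List.foldl_cons]
    by_cases hc : PySem.Set.contains seen s = true
    · have hsm : s ∈ seen := by simpa using hc
      have hstep : pvStepB cs (seen, out) (s, m) = (seen, out) := by
        unfold pvStepB
        rw [if_pos hc]
      rw [hstep]
      rw [ih seen out hlen (fun j' hj' hns => by
        have := h j' hj' hns
        rw [List.lookup_cons] at this
        have hne : ((j' : Int) == s) = false := by
          simp only [beq_eq_false_iff_ne, ne_eq]
          intro heq; exact hns (heq ▸ hsm)
        simpa [hne] using this) j hj]
      by_cases hm1 : (j : Int) ∈ seen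
      · simp [hm1]
      · have hne : ((j : Int) == s) = false := by
          simp only [beq_eq_false_iff_ne, ne_eq]
          intro heq; exact hm1 (heq ▸ hsm)
        simp [hm1, List.lookup_cons, hne]
    · have hsm : s ∉ seen := by simpa using hc
      -- tail hypothesis after adding s to seen
      have htail : ∀ (j' : Nat) (hj' : j' < cs.length), (j' : Int) ∉ PySem.Set.add seen s →
          List.lookup (j' : Int) t ≠ some (String.ofList [cs[j']]) := by
        intro j' hj' hns
        rw [PySem.Set.mem_add] at hns
        push Not at hns
        have := h j' hj' hns.1
        rw [List.lookup_cons] at this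
        have hne : ((j' : Int) == s) = false := by
          simp only [beq_eq_false_iff_ne, ne_eq]; exact hns.2
        simpa [hne] using this
      by_cases hr : 0 ≤ s ∧ s < (cs.length : Int)
      · have hsn : s = ((s.toNat : Nat) : Int) := (Int.toNat_of_nonneg hr.1).symm
        have hlt : s.toNat < cs.length := by omega
        have hg : PySem.List.pyGet? cs s = some cs[s.toNat] := by
          have h0 : PySem.List.pyGet? cs ((s.toNat : Nat) : Int) = cs[s.toNat]? :=
            PySem.List.pyGet?_natCast cs s.toNat
          rw [List.getElem?_eq_getElem hlt, ← hsn] at h0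
          exact h0
        have hmne : String.ofList [cs[s.toNat]] ≠ m := by
          intro heq
          have := h s.toNat hlt (by rw [← hsn]; exact hsm)
          rw [← hsn, List.lookup_cons] at this
          simp at this
          exact this heq.symm
        have hstep : pvStepB cs (seen, out) (s, m)
            = (PySem.Set.add seen s, out.set s.toNat m) := by
          unfold pvStepB
          rw [if_neg hc, if_pos hr, hg]
          simp [hmne]
        rw [hstep]
        rw [ih (PySem.Set.add seen s) (out.set s.toNat m)
          (by rw [List.length_set]; exact hlen) htail j hj]
        by_cases hm1 : (j : Int) ∈ seen
        · have hm2 : (j : Int) ∈ PySem.Set.add seen s := (PySem.Set.mem_add seen s _).mpr (Or.inl hm1)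
          have hjs : j ≠ s.toNat := by
            intro heq; subst heq; rw [← hsn] at hm1; exact hsm hm1
          simp [hm1, hm2, List.getElem?_set_ne (Ne.symm hjs)]
        · by_cases hjs : (j : Int) = s
          · have hm2 : (j : Int) ∈ PySem.Set.add seen s := (PySem.Set.mem_add seen s _).mpr (Or.inr hjs)
            have hjn : j = s.toNat := by omega
            subst hjn
            simp [hjs, hsm, List.getElem?_set_self (by rw [hlen]; exact hj)]
          · have hm2 : (j : Int) ∉ PySem.Set.add seen s := by
              rw [PySem.Set.mem_add]; push Not; exact ⟨hm1, hjs⟩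
            have hjn : j ≠ s.toNat := by omega
            have hne : ((j : Int) == s) = false := by simpa using hjs
            simp [hm1, hm2, List.lookup_cons, hne, List.getElem?_set_ne (Ne.symm hjn)]
      · have hstep : pvStepB cs (seen, out) (s, m) = (PySem.Set.add seen s, out) := by
          unfold pvStepB
          rw [if_neg hc, if_neg hr]
        rw [hstep]
        rw [ih (PySem.Set.add seen s) out hlen htail j hj]
        have hjs : (j : Int) ≠ s := by omega
        by_cases hm1 : (j : Int) ∈ seen
        · have hm2 : (j : Int) ∈ PySem.Set.add seen s := (PySem.Set.mem_add seen s _).mpr (Or.inl hm1)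
          simp [hm1, hm2]
        · have hm2 : (j : Int) ∉ PySem.Set.add seen s := by
            rw [PySem.Set.mem_add]; push Not; exact ⟨hm1, hjs⟩
          have hne : ((j : Int) == s) = false := by simpa using hjs
          simp [hm1, hm2, List.lookup_cons, hne]

-- ===== VERDICT (by name: the statement is the Claim_ definition above) =====
theorem introduce_specific_mutations_spec : Claim_equal_introduce_specific_mutations := by
  intro vntr sites mutations _hdom hpre
  obtain ⟨hlen, hp⟩ := hpre
  unfold Spec_introduce_specific_mutations
  unfold introduce_specific_mutations introduce_specific_mutations_alt
  rw [if_neg (by simp [hlen]), if_neg (by simp [hlen])]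
  have hA := pv_A_loop sites mutations (vntr.toList.map (fun c => String.ofList [c])) []
  simp only [List.length_nil, Nat.cast_zero, List.nil_append] at hA
  rw [hA]
  congr 1
  set cs := vntr.toList with hcs
  have hhyp : ∀ (j : Nat) (hj : j < cs.length), (j : Int) ∉ (PySem.Set.empty : PySem.Set Int) →
      List.lookup (j : Int) (sites.zip mutations) ≠ some (String.ofList [cs[j]]) := by
    intro j hj _
    rw [pv_lookup_zip _ sites mutations hlen]
    exact hp ((j : Int), cs[j]) ((PySem.List.mem_enumerate_iff _ _ _).mpr ⟨j, hj, by simp⟩)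
  apply List.ext_getElem?
  intro j
  by_cases hj : j < cs.length
  · rw [pv_B_loop cs (sites.zip mutations) PySem.Set.empty (cs.map (fun c => String.ofList [c]))
        (by simp) hhyp j hj]
    have hAj : ((PySem.List.enumerate (cs.map (fun c => String.ofList [c])) 0).map
        (pvGA sites mutations))[j]? = some (pvGA sites mutations ((j : Int), String.ofList [cs[j]])) := by
      rw [List.getElem?_map, PySem.List.getElem?_enumerate]
      simp [List.getElem?_eq_getElem (by simpa using hj : j < (cs.map (fun c => String.ofList [c])).length)]
    rw [hAj]
    have hemp : (j : Int) ∉ (PySem.Set.empty : PySem.Set Int) := by simp [PySem.Set.empty]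
    rw [if_neg hemp, pv_lookup_zip _ sites mutations hlen]
    have hne := hp ((j : Int), cs[j]) ((PySem.List.mem_enumerate_iff _ _ _).mpr ⟨j, hj, by simp⟩)
    cases hfm : pvFirstMut sites mutations (j : Int) with
    | none =>
      simp [pvGA, hfm, List.getElem?_map, List.getElem?_eq_getElem hj]
    | some m =>
      have hmne : ¬ m = String.ofList [cs[j]] := by
        intro heq; exact hne (by rw [hfm, heq])
      simp [pvGA, hfm, hmne]
  · have h1 : ((PySem.List.enumerate (cs.map (fun c => String.ofList [c])) 0).map
        (pvGA sites mutations)).length = cs.length := by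
      simp [PySem.List.length_enumerate]
    have h2 : ((List.foldl (pvStepB cs)
        ((PySem.Set.empty : PySem.Set Int), cs.map (fun c => String.ofList [c]))
        (sites.zip mutations)).2).length = cs.length := by
      rw [pv_B_loop_len]; simp
    rw [List.getElem?_eq_none (by omega), List.getElem?_eq_none (by omega)]
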